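-- pv_equiv track=rewrite | github.com/zhaolijian/suanfa | alibaba/ali0722/1.py | func
-- ===== SOURCE A (Python) =====
-- def func(n):
--     def function(array, rest):
--         if len(array) == n:
--             res.append(array)
--         else:
--             for i in range(len(rest)):
--                 if not array:
--                     function([rest[i]], rest[:i] + rest[i + 1:])
--                 elif abs(rest[i] - array[-1]) != 1:
--                     function(array + [rest[i]], rest[:i] + rest[i + 1:])
--
--     res = []
--     init = [i for i in range(1, n + 1)]
--     function([], init)
--     return res
-- ===== SOURCE B (Python) =====
-- def func(n):
--     # Pure top-down decomposition: solve(k, last, pool) returns every valid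
--     # length-k arrangement of pool whose head is not adjacent to `last`,
--     # built by consing on return (no accumulator, no shared result list).
--     def solve(k, last, pool):
--         if k == 0:
--             return [[]]
--         return [[pool[i]] + t
--                 for i in range(len(pool))
--                 if last is None or abs(pool[i] - last) != 1
--                 for t in solve(k - 1, pool[i], pool[:i] + pool[i + 1:])]
--
--     return solve(n, None, list(range(1, n + 1)))
-- ===== Notes on version B (the rewrite author's own statement) =====
-- stated objective: alternative
-- what changed: Replaces A's accumulator-style backtracking (growing prefix list compared against n, adjacency checked against array[-1], results appended to a shared res) with a pure top-down recursion solve(k, last, pool) that carries only a countdown and the previously placed element and builds each valid arrangement by consing completions on return, with the adjacency test as a comprehension filter.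
import Mathlib
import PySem

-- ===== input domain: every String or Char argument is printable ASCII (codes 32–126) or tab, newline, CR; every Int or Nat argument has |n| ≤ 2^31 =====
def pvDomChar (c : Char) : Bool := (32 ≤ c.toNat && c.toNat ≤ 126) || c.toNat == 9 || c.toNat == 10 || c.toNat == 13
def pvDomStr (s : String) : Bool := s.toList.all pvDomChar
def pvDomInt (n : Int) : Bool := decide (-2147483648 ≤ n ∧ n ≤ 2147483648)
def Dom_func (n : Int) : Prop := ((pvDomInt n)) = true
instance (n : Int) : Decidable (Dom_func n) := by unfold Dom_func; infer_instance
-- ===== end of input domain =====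

-- B replaces A's accumulator-and-mutation backtracking (prefix list + shared res) with a
-- pure top-down recursion that carries only a countdown and the last element and conses
-- the completions on return (objective: alternative decomposition, same cost).

-- ===== PORT A =====
-- recursive backtracking; the Python mutates a shared `res`, rendered here as the
-- concatenation (flatMap) of each iteration's appended results, in the same order
def funcGo (n : Int) (array rest : List Int) : List (List Int) :=
  if (array.length : Int) = n then [array]
  else
    (List.range rest.length).attach.flatMap (fun ⟨i, hi⟩ =>
      have hi' : i < rest.length := List.mem_range.mp hi
      let x := rest[i]
      let rest' := rest.take i ++ rest.drop (i + 1)  -- rest[:i] + rest[i+1:]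
      if array.isEmpty then funcGo n [x] rest'
      -- array[-1] on a nonempty list = getLastD
      else if (x - array.getLastD 0).natAbs ≠ 1 then funcGo n (array ++ [x]) rest'
      else [])
termination_by rest.length
decreasing_by
  all_goals
    simp only [List.length_append, List.length_take, List.length_drop]
    omega

def func (n : Int) : List (List Int) :=
  funcGo n [] (PySem.List.pyRange 1 (n + 1) 1)

-- ===== PORT B =====
-- `last is None or abs(pool[i] - last) != 1` (the getD is only reached when last ≠ none)
def solveArr (k : Int) (last : Option Int) (pool : List Int) : List (List Int) :=
  if k = 0 then [[]]
  else
    (List.range pool.length).attach.flatMap (fun ⟨i, hi⟩ =>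
      have hi' : i < pool.length := List.mem_range.mp hi
      let x := pool[i]
      if last.isNone || ((x - last.getD 0).natAbs != 1) then
        (solveArr (k - 1) (some x) (pool.take i ++ pool.drop (i + 1))).map (fun t => [x] ++ t)
      else [])
termination_by pool.length
decreasing_by
  all_goals
    simp only [List.length_append, List.length_take, List.length_drop]
    omega

def func_alt (n : Int) : List (List Int) :=
  solveArr n none (PySem.List.pyRange 1 (n + 1) 1)

-- ===== PRECONDITION & SPEC =====
def Spec_func (n : Int) (out : List (List Int)) : Prop := out = func_alt n
instance (n : Int) (out : List (List Int)) : Decidable (Spec_func n out) := by unfold Spec_func; infer_instance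

-- ===== CLAIM (what is proved, stated in full; the proofs are below) =====
def Claim_equal_func : Prop := ∀ (n : Int), Dom_func n → Spec_func n (func n)

-- ===== LEMMAS AND PROOFS =====
theorem funcGo_eq (n : Int) :
    ∀ (k : Nat) (rest array : List Int), rest.length = k →
      funcGo n array rest =
        (solveArr (n - array.length) array.getLast? rest).map (fun t => array ++ t) := by
  intro k
  induction k with
  | zero =>
    intro rest array hk
    have hrest : rest = [] := List.length_eq_zero_iff.mp hk
    subst hrest
    rw [funcGo, solveArr]
    by_cases h : (array.length : Int) = n
    · rw [if_pos h, if_pos (by omega)]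
      simp
    · rw [if_neg h, if_neg (by omega)]
      simp
  | succ k ih =>
    intro rest array hk
    by_cases h : (array.length : Int) = n
    · rw [funcGo, if_pos h, solveArr, if_pos (by omega)]
      simp
    · rw [funcGo, if_neg h, solveArr, if_neg (by omega)]
      rw [List.map_flatMap]
      apply List.flatMap_congr
      rintro ⟨i, hi⟩ -
      have hi' : i < rest.length := List.mem_range.mp hi
      simp only
      set x := rest[i] with hx
      set rest' := rest.take i ++ rest.drop (i + 1) with hr'
      have hlen' : rest'.length = k := by
        simp only [hr', List.length_append, List.length_take, List.length_drop]; omega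
      cases harr : array with
      | nil =>
        subst harr
        simp only [List.isEmpty_nil, List.getLast?_nil, Option.isNone_none,
          Bool.true_or, if_pos]
        rw [ih rest' [x] hlen']
        have hkk : n - (([x].length : Nat) : Int) = n - (([] : List Int).length : Nat) - 1 := by
          simp
        rw [hkk]
        simp [List.map_map, Function.comp_def]
      | cons a as =>
        have hane : array ≠ [] := by rw [harr]; simp
        obtain ⟨y, hy⟩ := Option.isSome_iff_exists.mp (List.getLast?_isSome.mpr hane)
        rw [← harr]
        have hnonempty : array.isEmpty = false := by simp [hane]
        rw [if_neg (by simp [hnonempty])]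
        simp only [hy, Option.isNone_some, Option.getD_some, Bool.false_or,
          List.getLastD_eq_getLast?]
        by_cases hc : (x - y).natAbs ≠ 1
        · rw [if_pos hc, if_pos (by simpa using hc)]
          rw [ih rest' (array ++ [x]) hlen']
          have hkk : n - (((array ++ [x]).length : Nat) : Int) = n - (array.length : Nat) - 1 := by
            simp only [List.length_append, List.length_cons, List.length_nil, Nat.cast_add,
              Nat.cast_one, Nat.cast_zero]; ring
          rw [hkk]
          have hgl2 : (array ++ [x]).getLast? = some x := by simp
          rw [hgl2, List.map_map]
          apply List.map_congr_left
          intro t _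
          simp
        · rw [if_neg hc, if_neg (by simpa using hc)]
          simp

-- ===== VERDICT (by name: the statement is the Claim_ definition above) =====
theorem func_spec : Claim_equal_func := by
  intro n _
  unfold Spec_func func func_alt
  rw [funcGo_eq n (PySem.List.pyRange 1 (n + 1) 1).length _ [] rfl]
  simp
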